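-- pv_equiv track=rewrite | github.com/aitortxu20/Retos-de-Programacion | #2 - tennis game/2.py | puntuation
-- ===== SOURCE A (Python) =====
-- secuence = ["P1", "P1", "P2", "P2", "P1", "P2", "P1", "P1"]
--
-- def puntuation(player, player_points):
--
--     player_game_points = []
--
--     for i in secuence:
--
--         if i == player:
--
--             if player_points < 30:
--                 player_points += 15
--             else:
--                 player_points += 10
--
--         else:
--             pass
--
--
--         player_game_points.append(player_points)
--
--     return player_game_points
-- ===== SOURCE B (Python) =====
-- secuence = ["P1", "P1", "P2", "P2", "P1", "P2", "P1", "P1"]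
--
-- def puntuation(player, player_points):
--     # closed-form score after n scoring events starting from player_points
--     def value(n):
--         if player_points >= 30:
--             return player_points + 10 * n
--         t = min(n, (44 - player_points) // 15)  # ceil((30 - player_points) / 15)
--         return player_points + 15 * t + 10 * (n - t)
--
--     counts = []
--     c = 0
--     for s in secuence:
--         c += (s == player)
--         counts.append(c)
--     return [value(n) for n in counts]
-- ===== Notes on version B (the rewrite author's own statement) =====
-- stated objective: alternative
-- what changed: B replaces the step-by-step accumulating loop by count-then-formula: it builds the prefix match counts and maps each count through a closed-form value(n) computed with ceiling division.
import Mathlib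
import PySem

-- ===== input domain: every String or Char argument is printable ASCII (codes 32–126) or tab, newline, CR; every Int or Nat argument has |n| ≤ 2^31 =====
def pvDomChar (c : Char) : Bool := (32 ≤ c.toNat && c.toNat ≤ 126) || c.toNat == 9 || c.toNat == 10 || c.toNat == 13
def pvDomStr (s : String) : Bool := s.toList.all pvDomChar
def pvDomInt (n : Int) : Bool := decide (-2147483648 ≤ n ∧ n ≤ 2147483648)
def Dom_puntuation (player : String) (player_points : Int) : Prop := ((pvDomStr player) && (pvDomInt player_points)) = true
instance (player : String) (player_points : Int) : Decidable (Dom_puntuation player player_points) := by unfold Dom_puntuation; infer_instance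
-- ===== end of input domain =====

-- B replaces A's mutating accumulation loop by prefix match counts mapped through a closed-form value(n); same cost, different shape.

-- the module-level constant 'secuence'
def pvSecuence : List String := ["P1", "P1", "P2", "P2", "P1", "P2", "P1", "P1"]

-- ===== PORT A =====
def puntuation (player : String) (player_points : Int) : List Int :=
  (pvSecuence.foldl
    (fun (st : Int × List Int) i =>
      let p := if i = player then (if st.1 < 30 then st.1 + 15 else st.1 + 10) else st.1
      (p, st.2 ++ [p]))
    (player_points, [])).2

-- ===== PORT B =====
def pvValue (player_points : Int) (n : Int) : Int :=
  if player_points ≥ 30 then player_points + 10 * n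
  else
    let t := min n (PySem.Int.floordiv (44 - player_points) 15)
    player_points + 15 * t + 10 * (n - t)

def puntuation_alt (player : String) (player_points : Int) : List Int :=
  let counts := (pvSecuence.foldl
    (fun (st : Int × List Int) s =>
      let c := st.1 + (if s = player then 1 else 0)
      (c, st.2 ++ [c]))
    (0, [])).2
  counts.map (pvValue player_points)

-- ===== PRECONDITION & SPEC =====
def Spec_puntuation (player : String) (player_points : Int) (out : List Int) : Prop := out = puntuation_alt player player_points
instance (player : String) (player_points : Int) (out : List Int) : Decidable (Spec_puntuation player player_points out) := by unfold Spec_puntuation; infer_instance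

-- ===== CLAIM (what is proved, stated in full; the proofs are below) =====
def Claim_equal_puntuation : Prop := ∀ (player : String) (player_points : Int), Dom_puntuation player player_points → Spec_puntuation player player_points (puntuation player player_points)

-- ===== LEMMAS AND PROOFS =====

theorem pvValue_zero (p : Int) : pvValue p 0 = p := by
  unfold pvValue
  by_cases h : p ≥ 30
  · simp [h]
  · simp only [if_neg h]
    have hkb := (PySem.Int.floordiv_eq_iff_of_pos (a := 44 - p) (b := 15)
      (q := PySem.Int.floordiv (44 - p) 15) (by norm_num)).mpr
    have hk1 : 1 ≤ PySem.Int.floordiv (44 - p) 15 := by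
      rcases (PySem.Int.floordiv_eq_iff_of_pos (a := 44 - p) (b := 15) (by norm_num)).mp rfl with ⟨h1, h2⟩
      nlinarith
    rw [min_eq_left (by omega)]
    ring

theorem pvValue_succ (p n : Int) (hn : 0 ≤ n) :
    pvValue p (n + 1) = (if pvValue p n < 30 then pvValue p n + 15 else pvValue p n + 10) := by
  unfold pvValue
  by_cases h : p ≥ 30
  · simp only [if_pos h]
    rw [if_neg (by omega)]
    ring
  · simp only [if_neg h]
    have h15 : (0:Int) < 15 := by norm_num
    set k := PySem.Int.floordiv (44 - p) 15 with hk
    have hkb : k * 15 ≤ 44 - p ∧ 44 - p < (k + 1) * 15 :=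
      (PySem.Int.floordiv_eq_iff_of_pos h15).mp hk.symm
    have hk1 : 1 ≤ k := by nlinarith [hkb.2]
    by_cases hlt : n < k
    · rw [min_eq_left (by omega), min_eq_left (by omega)]
      rw [if_pos (by nlinarith [hkb.1])]
      ring
    · rw [min_eq_right (by omega), min_eq_right (by omega)]
      rw [if_neg (by nlinarith [hkb.2])]
      ring

theorem pv_loop_eq (player : String) (p : Int) :
    ∀ (l : List String) (n : Int) (hn : 0 ≤ n) (outB : List Int),
      (l.foldl
        (fun (st : Int × List Int) i =>
          let q := if i = player then (if st.1 < 30 then st.1 + 15 else st.1 + 10) else st.1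
          (q, st.2 ++ [q]))
        (pvValue p n, outB.map (pvValue p))).2 =
      ((l.foldl
        (fun (st : Int × List Int) s =>
          let c := st.1 + (if s = player then 1 else 0)
          (c, st.2 ++ [c]))
        (n, outB)).2).map (pvValue p) := by
  intro l
  induction l with
  | nil => intro n hn outB; simp
  | cons x xs ih =>
    intro n hn outB
    simp only [List.foldl_cons]
    by_cases hx : x = player
    · simp only [if_pos hx]
      have := pvValue_succ p n hn
      have hmap : (outB.map (pvValue p)) ++ [pvValue p (n + 1)] = (outB ++ [n + 1]).map (pvValue p) := by
        simp
      rw [show (if pvValue p n < 30 then pvValue p n + 15 else pvValue p n + 10) = pvValue p (n + 1) from this.symm]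
      rw [hmap]
      exact ih (n + 1) (by omega) (outB ++ [n + 1])
    · simp only [if_neg hx, add_zero]
      have hmap : (outB.map (pvValue p)) ++ [pvValue p n] = (outB ++ [n]).map (pvValue p) := by
        simp
      rw [hmap]
      exact ih n hn (outB ++ [n])

-- ===== VERDICT (by name: the statement is the Claim_ definition above) =====
theorem puntuation_spec : Claim_equal_puntuation := by
  intro player player_points _
  unfold Spec_puntuation puntuation puntuation_alt
  have h := pv_loop_eq player player_points pvSecuence 0 (le_refl 0) []
  simpa [pvValue_zero, add_comm] using h
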